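-- pv_equiv track=rewrite | github.com/andywag/streaming_data_loader | python/problem.py | intersect_basic
-- ===== SOURCE A (Python) =====
-- from typing import List, Set
--
-- def check_item(xx, yy):
--
--     for x in xx:
--         if not x in yy:
--             return False
--     return True
--
-- def intersect_basic(data:List[Set[int]]):
--     removed = set()
--     data.sort(key=lambda x: -len(x))
--     for i in range(0, len(data)):
--         for j in range(i+1, len(data)):
--             if len(data[i]) != len(data[j]) and j not in removed:
--                 if check_item(data[j], data[i]):
--                     removed.add(j)
--
--     results = []
--     for i in range(0, len(data)):
--         if i not in removed:
--             results.append(data[i])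
--     return results
-- ===== SOURCE B (Python) =====
-- def intersect_basic(data):
--     data.sort(key=lambda x: -len(x))
--     # inverted index: element -> list of indices of the sets containing it
--     index = {}
--     for i, s in enumerate(data):
--         for x in s:
--             index.setdefault(x, []).append(i)
--     results = []
--     for s in data:
--         supers = list(range(len(data)))
--         for x in s:
--             occ = index.get(x, [])
--             supers = [j for j in supers if j in occ]
--         if all(len(data[j]) == len(s) for j in supers):
--             results.append(s)
--     return results
-- ===== Notes on version B (the rewrite author's own statement) =====
-- stated objective: alternative
-- what changed: A's triangular pairwise loop with a removed-index set and hand-rolled subset test is replaced by an inverted index mapping each element to the indices of the sets containing it; a set is kept iff every index surviving the intersection of its elements' posting lists holds a set of equal length, so no set-against-set subset comparison is performed.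
import Mathlib
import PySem

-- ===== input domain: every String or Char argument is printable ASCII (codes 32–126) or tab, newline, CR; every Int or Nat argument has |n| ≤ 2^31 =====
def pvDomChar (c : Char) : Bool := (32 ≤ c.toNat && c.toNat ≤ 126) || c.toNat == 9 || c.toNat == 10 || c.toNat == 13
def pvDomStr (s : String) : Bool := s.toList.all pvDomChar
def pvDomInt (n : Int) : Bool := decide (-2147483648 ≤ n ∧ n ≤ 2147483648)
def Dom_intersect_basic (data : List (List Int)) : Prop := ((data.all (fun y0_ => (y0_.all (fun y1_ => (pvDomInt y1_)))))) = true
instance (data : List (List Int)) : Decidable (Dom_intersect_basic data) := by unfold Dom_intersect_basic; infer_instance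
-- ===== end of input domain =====

-- B replaces A's triangular pairwise subset scan by an inverted index (element -> indices of the
-- sets containing it): a set is kept iff every set that contains all its elements has its length
-- ("alternative"); both Pythons sort `data` in place (same mutation); the equivalence proved is
-- about the return value.

-- ===== PORT A =====
def check_item (xx yy : List Int) : Bool :=
  match xx with
  | [] => true
  | x :: rest => if !(PySem.Set.contains yy x) then false else check_item rest yy

def intersect_basic (data : List (List Int)) : List (List Int) :=
  let removed : PySem.Set Int := PySem.Set.empty
  let data := PySem.List.sorted data (fun x => -(x.length : Int)) false
  let removed := (PySem.List.pyRange 0 (data.length : Int) 1).foldl (fun removed i =>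
    (PySem.List.pyRange (i + 1) (data.length : Int) 1).foldl (fun removed j =>
      if ((PySem.List.pyGetD data i []).length != (PySem.List.pyGetD data j []).length)
          && !(PySem.Set.contains removed j) then
        (if check_item (PySem.List.pyGetD data j []) (PySem.List.pyGetD data i []) then
          PySem.Set.add removed j
        else removed)
      else removed) removed) removed
  (PySem.List.pyRange 0 (data.length : Int) 1).foldl (fun results i =>
    if !(PySem.Set.contains removed i) then results ++ [PySem.List.pyGetD data i []]
    else results) []

-- ===== PORT B =====
-- Source B: build index = {element: list of indices of the sets containing it}, then keep s iff
-- every index whose set contains all of s's elements carries a set of s's length.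
def intersect_basic_alt (data : List (List Int)) : List (List Int) :=
  let d := PySem.List.sorted data (fun x => -(x.length : Int)) false
  let index : PySem.Dict Int (List Int) :=
    (PySem.List.enumerate d).foldl (fun idx p =>
      p.2.foldl (fun idx x => PySem.Dict.modify idx x [] (· ++ [p.1])) idx) PySem.Dict.empty
  d.foldl (fun results s =>
    let supers := s.foldl (fun supers x =>
      let occ := PySem.Dict.getD index x []
      supers.filter (fun j => occ.contains j)) (PySem.List.pyRange 0 (d.length : Int) 1)
    if supers.all (fun j => (PySem.List.pyGetD d j []).length == s.length)
    then results ++ [s] else results) []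

-- ===== PRECONDITION & SPEC =====
-- Pre_ states the set-representation invariant: A's Python argument is a list of SETS, and under the
-- type convention each set arrives as a list of DISTINCT elements, so an inner list with duplicates
-- encodes no input A is ever called on (its Python set would not have that length).
def Pre_intersect_basic (data : List (List Int)) : Prop := ∀ xs ∈ data, xs.Nodup
instance (data : List (List Int)) : Decidable (Pre_intersect_basic data) := by unfold Pre_intersect_basic; infer_instance
def pvWitness_intersect_basic : List (List Int) := [[1, 2], [1], [3]]

def Spec_intersect_basic (data : List (List Int)) (out : List (List Int)) : Prop := out = intersect_basic_alt data
instance (data : List (List Int)) (out : List (List Int)) : Decidable (Spec_intersect_basic data out) := by unfold Spec_intersect_basic; infer_instance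

-- ===== CLAIM (what is proved, stated in full; the proofs are below) =====
def Claim_equal_intersect_basic : Prop := ∀ (data : List (List Int)), Dom_intersect_basic data → Pre_intersect_basic data → Spec_intersect_basic data (intersect_basic data)

-- ===== LEMMAS AND PROOFS =====

theorem check_item_iff (xx yy : List Int) : check_item xx yy = true ↔ ∀ x ∈ xx, x ∈ yy := by
  induction xx with
  | nil => simp [check_item]
  | cons x rest ih =>
      by_cases h : x ∈ yy
      · simp [check_item, h, ih]
      · simp [check_item, h]

-- A's removal condition at Int indices i, j of the sorted list d
def condA (d : List (List Int)) (i j : Int) : Prop :=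
  (PySem.List.pyGetD d i []).length ≠ (PySem.List.pyGetD d j []).length
    ∧ check_item (PySem.List.pyGetD d j []) (PySem.List.pyGetD d i []) = true

theorem mem_innerfold (d : List (List Int)) (i : Int) (L : List Int) (R : PySem.Set Int) (x : Int) :
    x ∈ L.foldl (fun removed j =>
      if ((PySem.List.pyGetD d i []).length != (PySem.List.pyGetD d j []).length)
          && !(PySem.Set.contains removed j) then
        (if check_item (PySem.List.pyGetD d j []) (PySem.List.pyGetD d i []) then
          PySem.Set.add removed j
        else removed)
      else removed) R
    ↔ x ∈ R ∨ ∃ j ∈ L, x = j ∧ condA d i j := by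
  induction L generalizing R with
  | nil => simp
  | cons j L ih =>
      rw [List.foldl_cons, ih]
      have hstep : ∀ S : PySem.Set Int,
          (x ∈ (if ((PySem.List.pyGetD d i []).length != (PySem.List.pyGetD d j []).length)
              && !(PySem.Set.contains S j) then
            (if check_item (PySem.List.pyGetD d j []) (PySem.List.pyGetD d i []) then
              PySem.Set.add S j
            else S)
          else S)) ↔ (x ∈ S ∨ (x = j ∧ condA d i j)) := by
        intro S
        unfold condA
        split_ifs with h1 h2
        · simp only [Bool.and_eq_true, bne_iff_ne, Bool.not_eq_true'] at h1
          simp [PySem.Set.mem_add, h1.1, h2]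
        · simp only [Bool.and_eq_true, bne_iff_ne, Bool.not_eq_true'] at h1
          simp [h2]
        · simp only [Bool.and_eq_true, bne_iff_ne, Bool.not_eq_true', not_and_or] at h1
          rcases h1 with h | h
        -- length condition fails: condA false
          · simp only [not_not] at h
            simp [h]
          -- j already in removed: add is a no-op in membership
          · have hj : j ∈ S := by
              have := PySem.Set.contains_iff S j
              simp only [Bool.not_eq_false] at h
              exact this.mp h
            constructor
            · exact fun hx => Or.inl hx
            · rintro (hx | ⟨rfl, _⟩)
              · exact hx
              · exact hj
      rw [hstep]
      simp only [List.mem_cons]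
      constructor
      · rintro (h | ⟨j', hj', hx⟩)
        · rcases h with h | h
          · exact Or.inl h
          · exact Or.inr ⟨j, Or.inl rfl, h⟩
        · exact Or.inr ⟨j', Or.inr hj', hx⟩
      · rintro (h | ⟨j', hj' | hj', hx⟩)
        · exact Or.inl (Or.inl h)
        · subst hj'; exact Or.inl (Or.inr hx)
        · exact Or.inr ⟨j', hj', hx⟩

theorem mem_outerfold (d : List (List Int)) (n : Int) (LI : List Int) (R : PySem.Set Int) (x : Int) :
    x ∈ LI.foldl (fun removed i =>
      (PySem.List.pyRange (i + 1) n 1).foldl (fun removed j =>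
        if ((PySem.List.pyGetD d i []).length != (PySem.List.pyGetD d j []).length)
            && !(PySem.Set.contains removed j) then
          (if check_item (PySem.List.pyGetD d j []) (PySem.List.pyGetD d i []) then
            PySem.Set.add removed j
          else removed)
        else removed) removed) R
    ↔ x ∈ R ∨ ∃ i ∈ LI, ∃ j : Int, i < j ∧ j < n ∧ x = j ∧ condA d i j := by
  induction LI generalizing R with
  | nil => simp
  | cons i LI ih =>
      rw [List.foldl_cons, ih, mem_innerfold]
      simp only [List.mem_cons]
      constructor
      · rintro (h | ⟨i', hi', h⟩)
        · rcases h with h | ⟨j, hj, hx⟩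
          · exact Or.inl h
          · rw [PySem.List.mem_pyRange_one] at hj
            exact Or.inr ⟨i, Or.inl rfl, j, by omega, hj.2, hx⟩
        · exact Or.inr ⟨i', Or.inr hi', h⟩
      · rintro (h | ⟨i', rfl | hi', j, h1, h2, hx⟩)
        · exact Or.inl (Or.inl h)
        · exact Or.inl (Or.inr ⟨j, PySem.List.mem_pyRange_one.mpr ⟨by omega, h2⟩, hx⟩)
        · exact Or.inr ⟨i', hi', j, h1, h2, hx⟩

theorem nodup_subset_length_le (l l' : List Int) (h : l.Nodup) (hs : l ⊆ l') :
    l.length ≤ l'.length := by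
  calc l.length = l.toFinset.card := (List.toFinset_card_of_nodup h).symm
    _ ≤ l'.toFinset.card := Finset.card_le_card (fun x hx => by
        simp only [List.mem_toFinset] at hx ⊢; exact hs hx)
    _ ≤ l'.length := l'.toFinset_card_le

theorem nodup_superset_of_subset_of_length_le (l l' : List Int) (h : l.Nodup) (h' : l'.Nodup)
    (hs : l ⊆ l') (hl : l'.length ≤ l.length) : l' ⊆ l := by
  have hsub : l.toFinset ⊆ l'.toFinset := fun x hx => by
    simp only [List.mem_toFinset] at hx ⊢; exact hs hx
  have hcard : l'.toFinset.card ≤ l.toFinset.card := by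
    rw [List.toFinset_card_of_nodup h, List.toFinset_card_of_nodup h']; exact hl
  have := Finset.eq_of_subset_of_card_le hsub hcard
  intro x hx
  have : x ∈ l.toFinset := by rw [this]; simpa using hx
  simpa using this

-- indices i < k with A's condition  ⇔  some member of d is a proper superset of d[k]
theorem key_equiv (d : List (List Int)) (hnd : ∀ xs ∈ d, xs.Nodup)
    (hpw : d.Pairwise (fun a b => b.length ≤ a.length)) (k : Nat) (hk : k < d.length) :
    (∃ i, i < k ∧ (d.getD i []).length ≠ (d.getD k []).length ∧ d.getD k [] ⊆ d.getD i [])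
    ↔ (∃ t ∈ d, d.getD k [] ⊆ t ∧ ¬ t ⊆ d.getD k []) := by
  rw [List.pairwise_iff_getElem] at hpw
  have hgk : d.getD k [] = d[k] := List.getD_eq_getElem d [] hk
  constructor
  · rintro ⟨i, hik, hne, hsub⟩
    have hi : i < d.length := lt_trans hik hk
    have hgi : d.getD i [] = d[i] := List.getD_eq_getElem d [] hi
    refine ⟨d.getD i [], by rw [hgi]; exact d.getElem_mem hi, hsub, fun hts => hne ?_⟩
    have h1 := nodup_subset_length_le _ _ (hnd _ (by rw [hgk]; exact d.getElem_mem hk)) hsub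
    have h2 := nodup_subset_length_le _ _ (hnd _ (by rw [hgi]; exact d.getElem_mem hi)) hts
    omega
  · rintro ⟨t, ht, hsub, hnsub⟩
    obtain ⟨j, hj, rfl⟩ := List.mem_iff_getElem.mp ht
    have hndk : (d.getD k []).Nodup := hnd _ (by rw [hgk]; exact d.getElem_mem hk)
    have hndj : d[j].Nodup := hnd _ (d.getElem_mem hj)
    have hlen : (d.getD k []).length ≤ d[j].length := nodup_subset_length_le _ _ hndk hsub
    have hlt : (d.getD k []).length < d[j].length := by
      rcases lt_or_eq_of_le hlen with h | h
      · exact h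
      · exact absurd (nodup_superset_of_subset_of_length_le _ _ hndk hndj hsub (le_of_eq h.symm)) hnsub
    have hjk : j < k := by
      by_contra hge
      rcases Nat.lt_or_ge k j with hkj | hjk'
      · have := hpw k j hk hj hkj
        rw [hgk] at hlt; omega
      · have hkj : j = k := by omega
        subst hkj; rw [hgk] at hlt; omega
    exact ⟨j, hjk, by rw [List.getD_eq_getElem d [] hj]; omega, by rw [List.getD_eq_getElem d [] hj]; exact hsub⟩

-- index-filtered range mapped through getD equals a direct filter of the list
theorem filter_index (d : List (List Int)) (P : Nat → Bool) (q : List Int → Bool)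
    (h : ∀ i, i < d.length → P i = q (d.getD i [])) :
    ((List.range d.length).filter P).map (fun i => d.getD i []) = d.filter q := by
  induction d using List.reverseRecOn with
  | nil => simp
  | append_singleton d a ih =>
      rw [List.length_append, List.length_cons, List.length_nil, Nat.zero_add,
        List.range_succ, List.filter_append, List.map_append, List.filter_append]
      have h1 : ((List.range d.length).filter P).map (fun i => (d ++ [a]).getD i []) = d.filter q := by
        rw [← ih (fun i hi => by
          rw [h i (by simp; omega)]
          congr 1
          exact List.getD_append _ _ _ _ hi)]
        apply List.map_congr_left
        intro i hi
        have hi' : i < d.length := List.mem_range.mp (List.mem_filter.mp hi).1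
        exact List.getD_append _ _ _ _ hi'
      rw [h1]
      have h2 : (d ++ [a]).getD d.length [] = a := by
        rw [List.getD_eq_getElem _ _ (by simp)]
        simp
      have h3 : P d.length = q a := by rw [h d.length (by simp), h2]
      by_cases hq : q a = true
      · simp [hq, h3]
      · simp only [Bool.not_eq_true] at hq
        simp [hq, h3]

-- A's output is the sorted list filtered to the sets with no proper superset in it
theorem A_eq_filter (data : List (List Int)) (hpre : Pre_intersect_basic data) :
    intersect_basic data
      = (PySem.List.sorted data (fun x => -(x.length : Int)) false).filter
          (fun s => decide (∀ t ∈ PySem.List.sorted data (fun x => -(x.length : Int)) false,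
            s ⊆ t → t ⊆ s)) := by
  unfold intersect_basic
  simp only []
  set d := PySem.List.sorted data (fun x => -(x.length : Int)) false with hd
  have hnd : ∀ xs ∈ d, xs.Nodup := fun xs hx =>
    hpre xs ((PySem.List.mem_sorted data _ false xs).mp hx)
  have hpw : d.Pairwise (fun a b => b.length ≤ a.length) := by
    have := PySem.List.sorted_pairwise data (fun x => -(x.length : Int))
    exact this.imp (fun {a b} hab => by omega)
  rw [PySem.List.foldl_append_if, List.nil_append, PySem.List.pyRange_zero_natCast,
    List.filter_map, List.map_map]
  simp only [Function.comp_def, PySem.List.pyGetD_natCast]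
  apply filter_index
  intro k hk
  have hmem := mem_outerfold d (d.length : Int)
    (List.map (fun k : Nat => (k : Int)) (List.range d.length)) PySem.Set.empty (k : Int)
  rw [Bool.eq_iff_iff]
  simp only [Bool.not_eq_true', ← Bool.not_eq_true, PySem.Set.contains_iff]
  have h1 : ((k : Int) ∈ (List.map (fun k : Nat => (k : Int)) (List.range d.length)).foldl
      (fun removed i =>
        (PySem.List.pyRange (i + 1) (d.length : Int) 1).foldl (fun removed j =>
          if ((PySem.List.pyGetD d i []).length != (PySem.List.pyGetD d j []).length)
              && !(PySem.Set.contains removed j) then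
            (if check_item (PySem.List.pyGetD d j []) (PySem.List.pyGetD d i []) then
              PySem.Set.add removed j
            else removed)
          else removed) removed) PySem.Set.empty)
      ↔ ∃ t ∈ d, d.getD k [] ⊆ t ∧ ¬ t ⊆ d.getD k [] := by
    rw [hmem]
    constructor
    · rintro (h | ⟨i, hi, j, hij, hjn, hkj, hcond⟩)
      · simp [PySem.Set.empty] at h
      · simp only [List.mem_map, List.mem_range] at hi
        obtain ⟨i0, hi0lt, rfl⟩ := hi
        unfold condA at hcond
        rw [← hkj] at hcond
        simp only [PySem.List.pyGetD_natCast] at hcond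
        have hleft : ∃ i, i < k ∧ (d.getD i []).length ≠ (d.getD k []).length ∧
            d.getD k [] ⊆ d.getD i [] :=
          ⟨i0, by omega, hcond.1, fun x hx => ((check_item_iff _ _).mp hcond.2) x hx⟩
        exact (key_equiv d hnd hpw k hk).mp hleft
    · intro hex
      obtain ⟨i', hik, hne, hsub'⟩ := (key_equiv d hnd hpw k hk).mpr hex
      refine Or.inr ⟨(i' : Int), ?_, (k : Int), by exact_mod_cast hik, by exact_mod_cast hk, rfl, ?_, ?_⟩
      · simp only [List.mem_map, List.mem_range]
        exact ⟨i', lt_trans hik hk, rfl⟩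
      · rwa [PySem.List.pyGetD_natCast, PySem.List.pyGetD_natCast]
      · rw [check_item_iff, PySem.List.pyGetD_natCast, PySem.List.pyGetD_natCast]
        exact fun x hx => hsub' hx
  rw [h1, decide_eq_true_iff]
  constructor
  · rintro h t ht hsub
    by_contra hnsub
    exact h ⟨t, ht, hsub, hnsub⟩
  · rintro h ⟨t, ht, hsub, hnsub⟩
    exact hnsub (h t ht hsub)

-- B's nested index-building loop, flattened to one fold over (element, index) pairs
theorem index_flatten (l : List (Int × List Int)) (d0 : PySem.Dict Int (List Int)) :
    l.foldl (fun idx p =>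
      p.2.foldl (fun idx x => PySem.Dict.modify idx x [] (· ++ [p.1])) idx) d0
    = (l.flatMap (fun p => p.2.map (fun x => (x, p.1)))).foldl
        (fun idx q => PySem.Dict.modify idx q.1 [] (· ++ [q.2])) d0 := by
  induction l generalizing d0 with
  | nil => rfl
  | cons p l ih =>
      rw [List.foldl_cons, ih, List.flatMap_cons, List.foldl_append, List.foldl_map]

-- membership in B's index: j occurs under key x iff j is the index of a set of d containing x
theorem mem_index (d : List (List Int)) (x j : Int) :
    (j ∈ PySem.Dict.getD
        ((PySem.List.enumerate d).foldl (fun idx p =>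
          p.2.foldl (fun idx x => PySem.Dict.modify idx x [] (· ++ [p.1])) idx) PySem.Dict.empty)
        x [])
    ↔ ∃ k : Nat, ∃ h : k < d.length, j = (k : Int) ∧ x ∈ d[k] := by
  rw [index_flatten, PySem.Dict.getD_foldl_modify_append, PySem.Dict.getD_empty, List.nil_append]
  constructor
  · intro hmem
    obtain ⟨q, hq, rfl⟩ := List.mem_map.mp hmem
    have hq' := List.mem_filter.mp hq
    obtain ⟨p, hp, hq2⟩ := List.mem_flatMap.mp hq'.1
    obtain ⟨y, hy, rfl⟩ := List.mem_map.mp hq2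
    have hyx : y = x := by simpa using hq'.2
    obtain ⟨k, hk, hpk⟩ := (PySem.List.mem_enumerate_iff _ _ _).mp hp
    refine ⟨k, hk, by rw [hpk]; simp, ?_⟩
    rw [← hyx]
    have : p.2 = d[k] := by rw [hpk]
    rwa [this] at hy
  · rintro ⟨k, hk, rfl, hx⟩
    apply List.mem_map.mpr
    refine ⟨(x, (k : Int)), List.mem_filter.mpr ⟨List.mem_flatMap.mpr
      ⟨((k : Int), d[k]), ?_, List.mem_map.mpr ⟨x, hx, rfl⟩⟩, by simp⟩, rfl⟩
    exact (PySem.List.mem_enumerate_iff _ _ _).mpr ⟨k, hk, by simp⟩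

-- B's supers loop: the surviving indices are those whose set contains every element of s
theorem mem_supers (F : Int → List Int) (s : List Int) (su0 : List Int) (j : Int) :
    (j ∈ s.foldl (fun supers x => supers.filter (fun j => (F x).contains j)) su0)
    ↔ j ∈ su0 ∧ ∀ x ∈ s, j ∈ F x := by
  induction s generalizing su0 with
  | nil => simp
  | cons x s ih =>
      rw [List.foldl_cons, ih]
      simp only [List.mem_filter, List.contains_iff_mem, List.mem_cons]
      constructor
      · rintro ⟨⟨h0, hx⟩, hrest⟩
        exact ⟨h0, fun y hy => by rcases hy with rfl | hy; exact hx; exact hrest y hy⟩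
      · rintro ⟨h0, hall⟩
        exact ⟨⟨h0, hall x (Or.inl rfl)⟩, fun y hy => hall y (Or.inr hy)⟩

-- B's output is the same filtered list
theorem B_eq_filter (data : List (List Int)) (hpre : Pre_intersect_basic data) :
    intersect_basic_alt data
      = (PySem.List.sorted data (fun x => -(x.length : Int)) false).filter
          (fun s => decide (∀ t ∈ PySem.List.sorted data (fun x => -(x.length : Int)) false,
            s ⊆ t → t ⊆ s)) := by
  unfold intersect_basic_alt
  simp only []
  set d := PySem.List.sorted data (fun x => -(x.length : Int)) false with hd
  have hnd : ∀ xs ∈ d, xs.Nodup := fun xs hx =>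
    hpre xs ((PySem.List.mem_sorted data _ false xs).mp hx)
  rw [PySem.List.foldl_append_if_eq_filter, List.nil_append]
  apply List.filter_congr
  intro s hs
  rw [Bool.eq_iff_iff, List.all_eq_true, decide_eq_true_iff]
  have hchar : ∀ j : Int,
      (j ∈ s.foldl (fun supers x =>
          supers.filter (fun j =>
            (PySem.Dict.getD
              ((PySem.List.enumerate d).foldl (fun idx p =>
                p.2.foldl (fun idx x => PySem.Dict.modify idx x [] (· ++ [p.1])) idx)
                PySem.Dict.empty) x []).contains j))
        (PySem.List.pyRange 0 (d.length : Int) 1))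
      ↔ (0 ≤ j ∧ j < (d.length : Int)) ∧ ∀ x ∈ s, ∃ k : Nat, ∃ h : k < d.length, j = (k : Int) ∧ x ∈ d[k] := by
    intro j
    rw [mem_supers, PySem.List.mem_pyRange_one]
    constructor
    · rintro ⟨h0, hall⟩
      exact ⟨h0, fun x hx => (mem_index d x j).mp (hall x hx)⟩
    · rintro ⟨h0, hall⟩
      exact ⟨h0, fun x hx => (mem_index d x j).mpr (hall x hx)⟩
  constructor
  · -- all lengths equal on supers ⇒ no proper superset
    intro hall t ht hsub
    obtain ⟨k, hk, rfl⟩ := List.mem_iff_getElem.mp ht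
    have hmem : (k : Int) ∈ _ := (hchar (k : Int)).mpr
      ⟨⟨by omega, by exact_mod_cast hk⟩, fun x hx => ⟨k, hk, rfl, hsub hx⟩⟩
    have := hall (k : Int) hmem
    simp only [PySem.List.pyGetD_natCast, beq_iff_eq] at this
    rw [List.getD_eq_getElem d [] hk] at this
    exact nodup_superset_of_subset_of_length_le _ _
      (hnd s hs) (hnd _ (d.getElem_mem hk)) hsub (by omega)
  · -- no proper superset ⇒ all lengths equal on supers
    intro hq j hj
    obtain ⟨⟨h0, hn⟩, hall⟩ := (hchar j).mp hj
    have hkn : j.toNat < d.length := by omega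
    have hjk : j = (j.toNat : Int) := by omega
    have hsub : s ⊆ d[j.toNat] := by
      intro x hx
      obtain ⟨k, hk, hke, hxk⟩ := hall x hx
      have hkk : j.toNat = k := by omega
      subst hkk
      exact hxk
    have hts : d[j.toNat] ⊆ s := hq d[j.toNat] (d.getElem_mem hkn) hsub
    have h1 := nodup_subset_length_le _ _ (hnd s hs) hsub
    have h2 := nodup_subset_length_le _ _ (hnd _ (d.getElem_mem hkn)) hts
    rw [hjk]
    simp only [PySem.List.pyGetD_natCast, beq_iff_eq]
    rw [List.getD_eq_getElem d [] hkn]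
    omega

-- ===== VERDICT (by name: the statement is the Claim_ definition above) =====
theorem intersect_basic_spec : Claim_equal_intersect_basic := by
  intro data _hdom hpre
  unfold Spec_intersect_basic
  rw [A_eq_filter data hpre, B_eq_filter data hpre]
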